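-- pv_equiv track=rewrite | github.com/petsc/petsc | config/BuildSystem/config/setCompilers.py | containsInvalidLinkerFlag
-- ===== SOURCE A (Python) =====
-- def containsInvalidLinkerFlag(output):
--   '''If the output contains evidence that an invalid flag was used, return True'''
--   substrings = ('unknown argument', 'ignoring unsupported linker flag', 'unrecognized command line option','unrecognised command line option',
--                 'unrecognized option','unrecognised option','unknown option',
--                 'unknown flag','unsupported command line options encountered',
--                 'not supported','is unsupported and will be skipped','illegal option',
--                 'invalid option','invalid suboption',
--                 'unbekannte option',
--                 'warning: -commons use_dylibs is no longer supported, using error treatment instead',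
--                 'warning: -bind_at_load is deprecated on macOS',
--                 'no se reconoce la opci','non reconnue','warning: unsupported linker arg:','ignoring unknown option')
--   outlo = output.lower()
--   return any(sub.lower() in outlo for sub in substrings)
-- ===== SOURCE B (Python) =====
-- _MARKERS = ('unknown argument', 'ignoring unsupported linker flag',
--             'unrecognized command line option', 'unrecognised command line option',
--             'unrecognized option', 'unrecognised option', 'unknown option',
--             'unknown flag', 'unsupported command line options encountered',
--             'not supported', 'is unsupported and will be skipped', 'illegal option',
--             'invalid option', 'invalid suboption',
--             'unbekannte option',
--             'warning: -commons use_dylibs is no longer supported, using error treatment instead',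
--             'warning: -bind_at_load is deprecated on macos',
--             'no se reconoce la opci', 'non reconnue',
--             'warning: unsupported linker arg:', 'ignoring unknown option')
--
-- def _build_trie(words):
--   root = {}
--   for w in words:
--     node = root
--     for c in w:
--       node = node.setdefault(c, {})
--     node[None] = True  # end-of-marker flag
--   return root
--
-- _TRIE = _build_trie(_MARKERS)
--
-- def _match_here(node, s, j):
--   '''True iff some marker stored in the trie starts at position j of s.'''
--   if None in node:
--     return True
--   if j < len(s) and s[j] in node:
--     return _match_here(node[s[j]], s, j + 1)
--   return False
--
-- def containsInvalidLinkerFlag(output):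
--   '''If the output contains evidence that an invalid flag was used, return True'''
--   out = output.lower()
--   return any(_match_here(_TRIE, out, i) for i in range(len(out)))
-- ===== Notes on version B (the rewrite author's own statement) =====
-- stated objective: alternative
-- what changed: Replaced A's 21 independent whole-output substring searches by a prefix trie built once from the lowered markers and walked from each position of the lowered output, sharing common marker prefixes during matching.
import Mathlib
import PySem

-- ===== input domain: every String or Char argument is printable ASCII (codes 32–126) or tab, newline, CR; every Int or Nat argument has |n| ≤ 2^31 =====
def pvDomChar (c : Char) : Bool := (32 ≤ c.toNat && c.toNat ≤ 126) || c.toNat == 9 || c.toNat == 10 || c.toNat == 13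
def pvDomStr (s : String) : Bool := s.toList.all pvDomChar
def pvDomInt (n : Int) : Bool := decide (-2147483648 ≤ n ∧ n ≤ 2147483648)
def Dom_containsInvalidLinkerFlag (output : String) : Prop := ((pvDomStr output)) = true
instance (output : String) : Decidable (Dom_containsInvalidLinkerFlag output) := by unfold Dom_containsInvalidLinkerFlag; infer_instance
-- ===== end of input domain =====

-- B builds a prefix trie of the lowered markers once and walks it from each position of the lowered output, instead of A's 21 independent substring searches; alternative algorithm, same results.

-- ===== PORT A =====
def pvSubstringsA : List String :=
  ["unknown argument", "ignoring unsupported linker flag", "unrecognized command line option", "unrecognised command line option",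
   "unrecognized option", "unrecognised option", "unknown option",
   "unknown flag", "unsupported command line options encountered",
   "not supported", "is unsupported and will be skipped", "illegal option",
   "invalid option", "invalid suboption",
   "unbekannte option",
   "warning: -commons use_dylibs is no longer supported, using error treatment instead",
   "warning: -bind_at_load is deprecated on macOS",
   "no se reconoce la opci", "non reconnue", "warning: unsupported linker arg:", "ignoring unknown option"]

def containsInvalidLinkerFlag (output : String) : Bool :=
  let outlo := PySem.Str.lower output
  pvSubstringsA.any (fun sub => PySem.Str.isIn (PySem.Str.lower sub) outlo)

-- ===== PORT B =====
def pvMarkers : List String :=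
  ["unknown argument", "ignoring unsupported linker flag",
   "unrecognized command line option", "unrecognised command line option",
   "unrecognized option", "unrecognised option", "unknown option",
   "unknown flag", "unsupported command line options encountered",
   "not supported", "is unsupported and will be skipped", "illegal option",
   "invalid option", "invalid suboption",
   "unbekannte option",
   "warning: -commons use_dylibs is no longer supported, using error treatment instead",
   "warning: -bind_at_load is deprecated on macos",
   "no se reconoce la opci", "non reconnue",
   "warning: unsupported linker arg:", "ignoring unknown option"]

-- first-child/next-sibling trie (mutual pair; nested inductives are not allowed)
mutual
inductive PvTrie where
  | node : Bool → PvChildren → PvTrie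
  deriving DecidableEq, Repr
inductive PvChildren where
  | nil : PvChildren
  | cons : Char → PvTrie → PvChildren → PvChildren
  deriving DecidableEq, Repr
end

def pvChildGet? : PvChildren → Char → Option PvTrie
  | .nil, _ => none
  | .cons d t rest, c => if c = d then some t else pvChildGet? rest c

def pvChildSet : PvChildren → Char → PvTrie → PvChildren
  | .nil, c, t => .cons c t .nil
  | .cons d t0 rest, c, t => if c = d then .cons d t rest else .cons d t0 (pvChildSet rest c t)

-- node.setdefault walk of _build_trie, one word at a time
def pvInsert : List Char → PvTrie → PvTrie
  | [], .node _ cs => .node true cs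
  | c :: w, .node stop cs =>
      let child := (pvChildGet? cs c).getD (.node false .nil)
      .node stop (pvChildSet cs c (pvInsert w child))

def pvTrie : PvTrie := pvMarkers.foldl (fun t w => pvInsert w.toList t) (.node false .nil)

-- _match_here: walk the trie along the suffix of the output starting at the current position
def pvMatchHere : PvTrie → List Char → Bool
  | .node true _, _ => true
  | .node false _, [] => false
  | .node false cs, c :: s =>
      match pvChildGet? cs c with
      | some t => pvMatchHere t s
      | none => false

def containsInvalidLinkerFlag_alt (output : String) : Bool :=
  let out := (PySem.Str.lower output).toList
  (List.range out.length).any (fun i => pvMatchHere pvTrie (out.drop i))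

-- ===== PRECONDITION & SPEC =====
def Spec_containsInvalidLinkerFlag (output : String) (out : Bool) : Prop := out = containsInvalidLinkerFlag_alt output
instance (output : String) (out : Bool) : Decidable (Spec_containsInvalidLinkerFlag output out) := by unfold Spec_containsInvalidLinkerFlag; infer_instance

-- ===== CLAIM (what is proved, stated in full; the proofs are below) =====
def Claim_equal_containsInvalidLinkerFlag : Prop := ∀ (output : String), Dom_containsInvalidLinkerFlag output → Spec_containsInvalidLinkerFlag output (containsInvalidLinkerFlag output)

-- ===== LEMMAS AND PROOFS =====

-- lowering A's marker list yields exactly B's marker list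
set_option maxRecDepth 100000 in
set_option maxHeartbeats 2000000 in
theorem pv_lower_subs : pvSubstringsA.map PySem.Str.lower = pvMarkers := by decide

-- every marker is nonempty
theorem pv_markers_ne_nil : ∀ w ∈ pvMarkers, w.toList ≠ [] := by decide

theorem pv_childGet_set_self : ∀ (cs : PvChildren) (c : Char) (t : PvTrie),
    pvChildGet? (pvChildSet cs c t) c = some t
  | .nil, c, t => by simp [pvChildSet, pvChildGet?]
  | .cons d t0 rest, c, t => by
      by_cases h : c = d <;>
        simp [pvChildSet, pvChildGet?, h, pv_childGet_set_self rest c t]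

theorem pv_childGet_set_other : ∀ (cs : PvChildren) (c d : Char) (t : PvTrie), d ≠ c →
    pvChildGet? (pvChildSet cs c t) d = pvChildGet? cs d
  | .nil, c, d, t, h => by simp [pvChildSet, pvChildGet?, h]
  | .cons e t0 rest, c, d, t, h => by
      by_cases hc : c = e
      · subst hc; simp [pvChildSet, pvChildGet?, h]
      · by_cases hd : d = e <;>
          simp [pvChildSet, pvChildGet?, hc, hd, pv_childGet_set_other rest c d t h]

theorem pv_match_empty (s : List Char) : pvMatchHere (.node false .nil) s = false := by
  cases s <;> simp [pvMatchHere, pvChildGet?]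

theorem pv_match_insert (w : List Char) (t : PvTrie) (s : List Char) :
    pvMatchHere (pvInsert w t) s = (w.isPrefixOf s || pvMatchHere t s) := by
  induction w generalizing t s with
  | nil =>
      obtain ⟨b, cs⟩ := t
      simp [pvInsert, pvMatchHere, List.isPrefixOf]
  | cons c w ih =>
      obtain ⟨b, cs⟩ := t
      cases b with
      | true => simp [pvInsert, pvMatchHere]
      | false =>
          cases s with
          | nil => simp [pvInsert, pvMatchHere, List.isPrefixOf]
          | cons d s =>
              by_cases h : d = c
              · subst h
                simp only [pvInsert, pvMatchHere, pv_childGet_set_self, List.isPrefixOf_cons₂_self]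
                rw [ih]
                cases hg : pvChildGet? cs d with
                | none => simp [pv_match_empty]
                | some t' => simp
              · have h' : ¬ c = d := fun e => h e.symm
                simp only [pvInsert, pvMatchHere, pv_childGet_set_other cs c d _ h]
                cases hg : pvChildGet? cs d <;>
                  simp [List.isPrefixOf, h']

theorem pv_match_foldl (ws : List String) (t : PvTrie) (s : List Char) :
    pvMatchHere (ws.foldl (fun t w => pvInsert w.toList t) t) s
      = (ws.any (fun w => w.toList.isPrefixOf s) || pvMatchHere t s) := by
  induction ws generalizing t with
  | nil => simp
  | cons w ws ih => simp [List.foldl_cons, ih, pv_match_insert, Bool.or_assoc, Bool.or_comm]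

theorem pv_match_trie (s : List Char) :
    pvMatchHere pvTrie s = pvMarkers.any (fun w => w.toList.isPrefixOf s) := by
  rw [pvTrie, pv_match_foldl, pv_match_empty, Bool.or_false]

-- an infix of nonempty pattern occurs iff it is a prefix at some position i < length
theorem pv_infix_iff (p t : List Char) (hp : p ≠ []) : p <:+: t ↔ ∃ i < t.length, p <+: t.drop i := by
  constructor
  · intro h
    rcases (PySem.Chars.exists_prefix_drop_iff_isIn p t).mpr
        ((PySem.Chars.isIn_iff_infix p t).mpr h) with ⟨j, hj⟩
    rcases Nat.lt_or_ge j t.length with hlt | hge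
    · exact ⟨j, hlt, hj⟩
    · exfalso
      rw [List.drop_eq_nil_of_le hge] at hj
      exact hp (List.prefix_nil.mp hj)
  · rintro ⟨i, _, hpre⟩
    exact (PySem.Chars.isIn_iff_infix p t).mp
      ((PySem.Chars.exists_prefix_drop_iff_isIn p t).mp ⟨i, hpre⟩)

-- ===== VERDICT (by name: the statement is the Claim_ definition above) =====
theorem containsInvalidLinkerFlag_spec : Claim_equal_containsInvalidLinkerFlag := by
  intro output _
  show containsInvalidLinkerFlag output = containsInvalidLinkerFlag_alt output
  simp only [containsInvalidLinkerFlag, containsInvalidLinkerFlag_alt]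
  apply Bool.eq_iff_iff.mpr
  simp only [List.any_eq_true, List.mem_range, PySem.Str.isIn_iff_infix, pv_match_trie,
    List.isPrefixOf_iff_prefix]
  constructor
  · rintro ⟨sub, hmem, hinf⟩
    have hw : PySem.Str.lower sub ∈ pvMarkers := pv_lower_subs ▸ List.mem_map_of_mem hmem
    have hne := pv_markers_ne_nil _ hw
    rcases (pv_infix_iff _ _ hne).mp hinf with ⟨i, hi, hpre⟩
    exact ⟨i, hi, PySem.Str.lower sub, hw, hpre⟩
  · rintro ⟨i, hi, w, hw, hpre⟩
    have hw' : w ∈ pvSubstringsA.map PySem.Str.lower := by rw [pv_lower_subs]; exact hw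
    rcases List.mem_map.mp hw' with ⟨sub, hmem, rfl⟩
    have hne := pv_markers_ne_nil _ hw
    exact ⟨sub, hmem, (pv_infix_iff _ _ hne).mpr ⟨i, hi, hpre⟩⟩
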